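-- pv_equiv track=rewrite | github.com/brainwhat/CDMA | cdma.py | ascii_to_bits
-- ===== SOURCE A (Python) =====
-- from typing import List, Dict, Optional
--
-- def ascii_to_bits(text: str) -> List[int]:
--     """Преобразовать текст ASCII в список битов 0/1 (8 бит на символ, MSB→LSB)."""
--     bits: List[int] = []
--     for ch in text:
--         code_point = ord(ch)
--         # Ограничить к 8-битному диапазону ASCII (0..255); при выходе взять младшие 8 бит.
--         code_point &= 0xFF
--         for bit_index in range(7, -1, -1):
--             bit = (code_point >> bit_index) & 1
--             bits.append(bit)
--     return bits
-- ===== SOURCE B (Python) =====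
-- from typing import List
--
-- # Precomputed 256-entry table: LUT[b] = the 8 bits of byte b, MSB first.
-- LUT: List[List[int]] = [[(b >> i) & 1 for i in range(7, -1, -1)] for b in range(256)]
--
-- def ascii_to_bits(text: str) -> List[int]:
--     bits: List[int] = []
--     for ch in text:
--         bits += LUT[ord(ch) & 0xFF]
--     return bits
-- ===== Notes on version B (the rewrite author's own statement) =====
-- stated objective: faster
-- what changed: Replaces the per-character inner bit loop by a precomputed 256-entry bit table indexed by the masked code point, with a single flat extend pass over the text.
import Mathlib
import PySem

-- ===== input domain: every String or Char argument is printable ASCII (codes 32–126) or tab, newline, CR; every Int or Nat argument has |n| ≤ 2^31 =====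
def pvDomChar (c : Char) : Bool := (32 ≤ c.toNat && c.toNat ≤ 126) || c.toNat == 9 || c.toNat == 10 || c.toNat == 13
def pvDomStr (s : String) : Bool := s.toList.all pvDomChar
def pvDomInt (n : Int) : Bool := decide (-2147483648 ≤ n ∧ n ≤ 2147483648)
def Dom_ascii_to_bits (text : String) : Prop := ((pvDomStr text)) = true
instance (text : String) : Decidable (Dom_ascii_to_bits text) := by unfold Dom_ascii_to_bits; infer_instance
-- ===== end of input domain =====

-- B replaces A's per-character inner bit loop by a precomputed 256-entry bit table
-- indexed by the masked code point (objective: faster, constant-factor).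

-- shared helper spelling of '(code >> i) & 1' (both Pythons contain this very expression)
def pvBit (code : Int) (i : Int) : Int := PySem.Int.band (code >>> i.toNat) 1

-- ===== PORT A =====
-- nested loops: for ch in text / for bit_index in range(7,-1,-1): bits.append((code >> i) & 1)
def ascii_to_bits (text : String) : List Int :=
  text.toList.foldl (fun bits ch =>
    let code : Int := PySem.Int.band ((ch.toNat : Int)) 0xFF
    (PySem.List.pyRange 7 (-1) (-1)).foldl (fun bits i =>
      bits ++ [pvBit code i]) bits) []

-- ===== PORT B =====
-- LUT = [[(b >> i) & 1 for i in range(7, -1, -1)] for b in range(256)]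
def pvLUT : List (List Int) :=
  (PySem.List.pyRange 0 256 1).map (fun b =>
    (PySem.List.pyRange 7 (-1) (-1)).map (fun i => pvBit b i))

-- bits += LUT[ord(ch) & 0xFF]; the index is always in range 0..255, so the default is never used
def ascii_to_bits_alt (text : String) : List Int :=
  text.toList.foldl (fun bits ch =>
    bits ++ PySem.List.pyGetD pvLUT (PySem.Int.band ((ch.toNat : Int)) 0xFF) []) []

-- ===== PRECONDITION & SPEC =====
def Spec_ascii_to_bits (text : String) (out : List Int) : Prop := out = ascii_to_bits_alt text
instance (text : String) (out : List Int) : Decidable (Spec_ascii_to_bits text out) := by unfold Spec_ascii_to_bits; infer_instance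

-- ===== CLAIM (what is proved, stated in full; the proofs are below) =====
def Claim_equal_ascii_to_bits : Prop := ∀ (text : String), Dom_ascii_to_bits text → Spec_ascii_to_bits text (ascii_to_bits text)

-- ===== LEMMAS AND PROOFS =====

-- the masked code point equals a Nat cast and is < 256
theorem pv_band_eq (m : Nat) : PySem.Int.band ((m : Int)) 0xFF = ((m &&& 255 : Nat) : Int) := by
  simpa using PySem.Int.band_natCast m 255

-- table lookup at the masked code point = the bits A's inner loop produces
theorem pv_lut_lookup (code : Int) (h0 : 0 ≤ code) (h1 : code < 256) :
    PySem.List.pyGetD pvLUT code [] =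
      (PySem.List.pyRange 7 (-1) (-1)).map (fun i => pvBit code i) := by
  unfold pvLUT
  exact PySem.List.pyGetD_map_pyRange_of_nonneg
    (fun b => (PySem.List.pyRange 7 (-1) (-1)).map (fun i => pvBit b i)) 256 code [] h0 h1

-- ===== VERDICT (by name: the statement is the Claim_ definition above) =====
theorem ascii_to_bits_spec : Claim_equal_ascii_to_bits := by
  intro text _
  unfold Spec_ascii_to_bits ascii_to_bits ascii_to_bits_alt
  congr 1
  funext bits ch
  rw [PySem.List.foldl_append_singleton_eq_map]
  rw [pv_lut_lookup]
  · rw [pv_band_eq]; exact Int.natCast_nonneg _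
  · rw [pv_band_eq]
    have h : ch.toNat &&& 255 ≤ 255 := Nat.and_le_right
    exact_mod_cast Nat.lt_succ_of_le h
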